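-- pv_equiv track=rewrite | github.com/papag00se/coding-agent-router | app/compaction/handoff.py | _strip_current_request_section
-- ===== SOURCE A (Python) =====
-- def _strip_current_request_section(content: str) -> str:
--     if "## Current Request" not in content:
--         return content
--
--     lines = content.splitlines()
--     filtered: list[str] = []
--     skipping = False
--     for line in lines:
--         if line == "## Current Request":
--             skipping = True
--             continue
--         if skipping and line.startswith("## "):
--             skipping = False
--         if not skipping:
--             filtered.append(line)
--
--     normalized = "\n".join(filtered).rstrip()
--     return normalized + "\n" if normalized else ""
-- ===== SOURCE B (Python) =====
-- def _strip_current_request_section(content: str) -> str: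
--     if "## Current Request" not in content:
--         return content
--
--     lines = content.splitlines()
--     n = len(lines)
--     i = 0
--     while i < n and not lines[i].startswith("## "):
--         i += 1
--     kept = lines[:i]  # preamble before the first "## " header
--     while i < n:
--         j = i + 1
--         while j < n and not lines[j].startswith("## "):
--             j += 1
--         if lines[i] != "## Current Request":
--             kept.extend(lines[i:j])
--         i = j
--
--     normalized = "\n".join(kept).rstrip()
--     return normalized + "\n" if normalized else ""
-- ===== Notes on version B (the rewrite author's own statement) =====
-- stated objective: alternative
-- what changed: Replaces A's single pass with a skipping flag by a group-structured scan: split the lines into a preamble plus one group per '## ' header (header + body found by scanning to the next header), drop groups headed exactly by '## Current Request', and concatenate the rest; guard and final join/rstrip normalization unchanged.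
import Mathlib
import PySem

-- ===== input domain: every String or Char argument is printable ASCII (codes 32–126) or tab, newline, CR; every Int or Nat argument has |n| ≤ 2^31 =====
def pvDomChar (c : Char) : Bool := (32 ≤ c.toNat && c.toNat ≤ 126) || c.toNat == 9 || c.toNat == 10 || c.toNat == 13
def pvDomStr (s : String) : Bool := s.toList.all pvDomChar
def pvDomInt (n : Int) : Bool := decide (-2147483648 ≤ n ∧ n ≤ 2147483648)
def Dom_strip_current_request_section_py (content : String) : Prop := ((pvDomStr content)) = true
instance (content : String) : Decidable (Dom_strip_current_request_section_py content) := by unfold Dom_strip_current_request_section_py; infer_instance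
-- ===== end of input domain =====

-- B removes the "## Current Request" section by scanning header-delimited groups
-- (preamble + one group per "## " header) instead of A's skipping-flag filter; objective: alternative.

-- ===== PORT A =====
-- one iteration of A's for-loop over (filtered, skipping)
def pvAStep (st : List String × Bool) (line : String) : List String × Bool :=
  if line == "## Current Request" then (st.1, true)
  else
    let skipping := if st.2 && PySem.Str.startswith line "## " then false else st.2
    if !skipping then (st.1 ++ [line], skipping) else (st.1, skipping)

def strip_current_request_section_py (content : String) : String :=
  if PySem.Str.isIn "## Current Request" content = false then content
  else
    let lines := PySem.Str.splitlines content
    let res := lines.foldl pvAStep ([], false)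
    let normalized := PySem.Str.rstrip (PySem.Str.join "\n" res.1)
    if normalized ≠ "" then normalized ++ "\n" else ""

-- ===== PORT B =====
def pvIsHeader (l : String) : Bool := PySem.Str.startswith l "## "

-- B's outer while-loop: one step per "## " header group (header + its body lines)
def pvGroups : List String → List String
  | [] => []
  | h :: rest =>
    let body := rest.takeWhile (fun l => !pvIsHeader l)
    let rest' := rest.dropWhile (fun l => !pvIsHeader l)
    (if h == "## Current Request" then [] else h :: body) ++ pvGroups rest'
termination_by lines => lines.length
decreasing_by
  simp only [List.length_cons]
  have := List.length_dropWhile_le (fun l => !pvIsHeader l) rest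
  omega

def strip_current_request_section_py_alt (content : String) : String :=
  if PySem.Str.isIn "## Current Request" content = false then content
  else
    let lines := PySem.Str.splitlines content
    let kept := lines.takeWhile (fun l => !pvIsHeader l) ++
                pvGroups (lines.dropWhile (fun l => !pvIsHeader l))
    let normalized := PySem.Str.rstrip (PySem.Str.join "\n" kept)
    if normalized ≠ "" then normalized ++ "\n" else ""

-- ===== PRECONDITION & SPEC =====
def Spec_strip_current_request_section_py (content : String) (out : String) : Prop := out = strip_current_request_section_py_alt content
instance (content : String) (out : String) : Decidable (Spec_strip_current_request_section_py content out) := by unfold Spec_strip_current_request_section_py; infer_instance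

-- ===== CLAIM (what is proved, stated in full; the proofs are below) =====
def Claim_equal_strip_current_request_section_py : Prop := ∀ (content : String), Dom_strip_current_request_section_py content → Spec_strip_current_request_section_py content (strip_current_request_section_py content)

-- ===== LEMMAS AND PROOFS =====

-- recursive characterisation of A's loop result
def aKept : List String → Bool → List String
  | [], _ => []
  | l :: rest, skip =>
    if l == "## Current Request" then aKept rest true
    else
      let skip' := if skip && pvIsHeader l then false else skip
      if !skip' then l :: aKept rest skip' else aKept rest skip'

theorem foldl_aKept (lines : List String) (acc : List String) (skip : Bool) :
    (lines.foldl pvAStep (acc, skip)).1 = acc ++ aKept lines skip := by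
  induction lines generalizing acc skip with
  | nil => simp [aKept]
  | cons l rest ih =>
    simp only [List.foldl_cons, pvAStep, aKept, pvIsHeader]
    split_ifs with h1 h2 <;> simp [ih]

theorem header_of_cr (l : String) (h : l = "## Current Request") : pvIsHeader l = true := by
  subst h; decide

theorem aKept_eq_groups : ∀ n (lines : List String), lines.length ≤ n →
    aKept lines false = lines.takeWhile (fun l => !pvIsHeader l) ++
      pvGroups (lines.dropWhile (fun l => !pvIsHeader l)) ∧
    aKept lines true = pvGroups (lines.dropWhile (fun l => !pvIsHeader l)) := by
  intro n
  induction n with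
  | zero =>
    intro lines hlen
    have : lines = [] := List.eq_nil_of_length_eq_zero (Nat.le_zero.mp hlen)
    subst this; simp [aKept, pvGroups]
  | succ n ih =>
    intro lines hlen
    match lines with
    | [] => simp [aKept, pvGroups]
    | l :: rest =>
      simp only [List.length_cons, Nat.succ_le_succ_iff] at hlen
      by_cases hh : pvIsHeader l = true
      · -- l is a "## " header: takeWhile stops, dropWhile keeps l
        simp only [List.takeWhile_cons, List.dropWhile_cons, hh, Bool.not_true,
          Bool.false_eq_true, if_false]
        by_cases hcr : l = "## Current Request"
        · subst hcr
          have hrec := (ih rest hlen).2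
          constructor <;>
            simp [aKept, pvGroups, hrec]
        · have hbeq : (l == "## Current Request") = false := by
            simp [hcr]
          have hrec := (ih rest hlen).1
          constructor <;>
          · simp only [aKept, hbeq, Bool.false_eq_true, if_false, pvGroups, hh,
              Bool.and_true, Bool.and_false, if_true, if_false]
            simp [hrec]
      · -- l is not a header: kept in preamble / skipped while skipping
        have hcr : l ≠ "## Current Request" := fun h => hh (header_of_cr l h)
        have hbeq : (l == "## Current Request") = false := by simp [hcr]
        have hh' : pvIsHeader l = false := by simpa using hh
        have hrec := ih rest hlen
        constructor
        · simp only [aKept, hbeq, Bool.false_eq_true, if_false, Bool.and_false, hh', List.takeWhile_cons, List.dropWhile_cons,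
            Bool.not_false, if_true]
          simp [hrec.1]
        · simp only [aKept, hbeq, Bool.false_eq_true, if_false, hh',
            Bool.and_false, if_true, Bool.not_true, List.dropWhile_cons,
            Bool.not_false]
          simp [hrec.2]

-- ===== VERDICT (by name: the statement is the Claim_ definition above) =====
theorem strip_current_request_section_py_spec : Claim_equal_strip_current_request_section_py := by
  intro content _
  unfold Spec_strip_current_request_section_py strip_current_request_section_py
    strip_current_request_section_py_alt
  have hkept := (aKept_eq_groups (PySem.Str.splitlines content).length
    (PySem.Str.splitlines content) le_rfl).1
  simp only [foldl_aKept, List.nil_append, hkept]
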